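-- pv_equiv track=rewrite | github.com/pypi-data/pypi-mirror-401 | packages/openagents/openagents-0.8.5.post5-py3-none-any.whl/openagents/core/agent_identity.py | _is_valid_agent_id
-- ===== SOURCE A (Python) =====
-- def _is_valid_agent_id(agent_id: str) -> bool:
--     """Validate an agent ID format.
--
--     Args:
--         agent_id: The agent ID to validate
--
--     Returns:
--         True if valid, False otherwise
--     """
--     if not agent_id or not isinstance(agent_id, str):
--         return False
--
--     # Basic validation rules
--     if len(agent_id) < 3 or len(agent_id) > 64:
--         return False
--
--     # Allow alphanumeric, hyphens, underscores
--     if not all(c.isalnum() or c in "-_" for c in agent_id):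
--         return False
--
--     # Must start with alphanumeric
--     if not agent_id[0].isalnum():
--         return False
--
--     return True
-- ===== SOURCE B (Python) =====
-- def _is_valid_agent_id(agent_id: str) -> bool:
--     """Single streaming pass: walk the characters once with a running count,
--     enforcing the first-character rule, the character set and both length
--     bounds inside the one loop (no len(), no separate all() pass)."""
--     if not isinstance(agent_id, str):
--         return False
--     n = 0
--     for c in agent_id:
--         if n == 0:
--             if not c.isalnum():
--                 return False
--         elif not (c.isalnum() or c in "-_"):
--             return False
--         n += 1
--         if n > 64:
--             return False
--     return n >= 3
-- ===== Notes on version B (the rewrite author's own statement) =====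
-- stated objective: alternative
-- what changed: Replaces A's staged guards (len() bounds check, then an all() per-character pass, then a separate first-character test) with a single streaming pass: one loop with a running count that enforces the first-character rule, the character set and both length bounds as it walks, with early exit.
import Mathlib
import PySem

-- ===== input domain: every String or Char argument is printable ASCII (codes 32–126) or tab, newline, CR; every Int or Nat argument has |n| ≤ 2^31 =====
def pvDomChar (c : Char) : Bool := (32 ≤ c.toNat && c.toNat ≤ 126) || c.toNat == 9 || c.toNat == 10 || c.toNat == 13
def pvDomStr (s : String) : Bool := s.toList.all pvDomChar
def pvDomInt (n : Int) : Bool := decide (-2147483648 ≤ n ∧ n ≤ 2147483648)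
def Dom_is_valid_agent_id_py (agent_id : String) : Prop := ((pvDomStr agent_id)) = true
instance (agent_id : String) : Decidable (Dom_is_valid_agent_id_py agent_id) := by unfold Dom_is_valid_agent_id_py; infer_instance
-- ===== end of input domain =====

-- B replaces A's staged guards (length bounds, then a per-character all() pass, then a
-- separate first-character test) by ONE streaming pass with a running count; same cost.

-- ===== PORT A =====
def is_valid_agent_id_py (agent_id : String) : Bool :=
  -- if not agent_id: return False   (isinstance(agent_id, str) is always true under the type convention)
  if agent_id.toList.isEmpty then false
  -- if len(agent_id) < 3 or len(agent_id) > 64: return False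
  else if PySem.Str.len agent_id < 3 || PySem.Str.len agent_id > 64 then false
  -- if not all(c.isalnum() or c in "-_" for c in agent_id): return False
  else if !(agent_id.toList.all (fun c => PySem.Chars.isalnum c || PySem.Chars.isIn [c] "-_".toList)) then false
  -- if not agent_id[0].isalnum(): return False; return True
  else match PySem.Str.pyGet? agent_id 0 with
    | some c => if !(PySem.Chars.isalnum c) then false else true
    | none => false   -- unreachable: the emptiness guard above already returned

-- ===== PORT B =====
-- the for-loop of Source B: state is the running count n; per character the branch on n == 0,
-- the character check, the increment and the > 64 early exit; at loop end 'return n >= 3'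
def pvAltGo (l : List Char) (n : Nat) : Bool :=
  match l with
  | [] => decide (3 ≤ n)
  | c :: t =>
    if (if n = 0 then !(PySem.Chars.isalnum c)
        else !(PySem.Chars.isalnum c || PySem.Chars.isIn [c] "-_".toList)) then false
    else if n + 1 > 64 then false
    else pvAltGo t (n + 1)

def is_valid_agent_id_py_alt (agent_id : String) : Bool :=
  pvAltGo agent_id.toList 0

-- ===== PRECONDITION & SPEC =====
def Spec_is_valid_agent_id_py (agent_id : String) (out : Bool) : Prop := out = is_valid_agent_id_py_alt agent_id
instance (agent_id : String) (out : Bool) : Decidable (Spec_is_valid_agent_id_py agent_id out) := by unfold Spec_is_valid_agent_id_py; infer_instance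

-- ===== CLAIM =====
def Claim_equal_is_valid_agent_id_py : Prop := ∀ (agent_id : String), Dom_is_valid_agent_id_py agent_id → Spec_is_valid_agent_id_py agent_id (is_valid_agent_id_py agent_id)

-- ===== LEMMAS AND PROOFS =====

-- characterisation of the loop after the first character (n ≥ 1, invariant n ≤ 64)
theorem pvAltGo_char (l : List Char) (n : Nat) (h1 : 1 ≤ n) (h2 : n ≤ 64) :
    pvAltGo l n
      = ((l.all (fun c => PySem.Chars.isalnum c || PySem.Chars.isIn [c] "-_".toList))
          && decide (n + l.length ≤ 64) && decide (3 ≤ n + l.length)) := by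
  induction l generalizing n with
  | nil =>
    simp [pvAltGo]
    omega
  | cons c t ih =>
    have hn0 : ¬ n = 0 := by omega
    simp only [pvAltGo, hn0, if_false, List.all_cons, List.length_cons]
    cases hc : (PySem.Chars.isalnum c || PySem.Chars.isIn [c] "-_".toList) with
    | false => simp
    | true =>
      simp only [Bool.not_true, if_neg (by simp : ¬ ((false : Bool) = true)), Bool.true_and]
      by_cases hov : n + 1 > 64
      · rw [if_pos hov]
        have : ¬ (n + (t.length + 1) ≤ 64) := by omega
        simp [this]
      · rw [if_neg hov, ih (n + 1) (by omega) (by omega)]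
        have e : n + 1 + t.length = n + (t.length + 1) := by omega
        simp only [e]
        rfl

-- ===== VERDICT =====
theorem is_valid_agent_id_py_spec : Claim_equal_is_valid_agent_id_py := by
  intro s _
  unfold Spec_is_valid_agent_id_py is_valid_agent_id_py is_valid_agent_id_py_alt
  cases hl : s.toList with
  | nil => simp [pvAltGo]
  | cons c t =>
    have hlen : PySem.Str.len s = ((t.length + 1 : Nat) : Int) := by
      simp [PySem.Str.len_eq, hl]
    have hget : PySem.Str.pyGet? s 0 = some c := by
      simp [PySem.Str.pyGet?, hl, PySem.List.pyGet?, PySem.List.pyIdx?]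
    rw [hget, hlen]
    simp only [List.isEmpty_cons, if_neg (by simp : ¬ ((false:Bool) = true))]
    -- unfold one step of the loop: n = 0 branch
    have hB : pvAltGo (c :: t) 0
        = (if !(PySem.Chars.isalnum c) then false
           else (t.all (fun x => PySem.Chars.isalnum x || PySem.Chars.isIn [x] "-_".toList)
                 && decide (1 + t.length ≤ 64) && decide (3 ≤ 1 + t.length))) := by
      by_cases hc : PySem.Chars.isalnum c
      · rw [pvAltGo, if_pos rfl, hc]
        rw [if_neg (by simp), if_neg (by omega)]
        simp [pvAltGo_char t 1 (by omega) (by omega)]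
      · rw [pvAltGo, if_pos rfl, Bool.eq_false_iff.mpr hc]
        simp
    rw [hB]
    by_cases hc : PySem.Chars.isalnum c
    · have hcA : (PySem.Chars.isalnum c || PySem.Chars.isIn [c] "-_".toList) = true := by
        rw [hc]; rfl
      rw [hc]
      simp only [List.all_cons, hcA, Bool.true_and, Bool.not_true,
        if_neg (by simp : ¬ ((false:Bool) = true))]
      by_cases hlo : ((t.length + 1 : Nat) : Int) < 3
      · rw [if_pos (by simp only [decide_eq_true_eq, Bool.or_eq_true]; omega)]
        have : decide (3 ≤ 1 + t.length) = false := by simp; omega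
        simp [this]
      · by_cases hhi : ((t.length + 1 : Nat) : Int) > 64
        · rw [if_pos (by simp only [decide_eq_true_eq, Bool.or_eq_true]; omega)]
          have : decide (1 + t.length ≤ 64) = false := by simp; omega
          simp [this]
        · rw [if_neg (by simp only [decide_eq_true_eq, Bool.or_eq_true]; omega)]
          have e1 : decide (1 + t.length ≤ 64) = true := by simp; omega
          have e2 : decide (3 ≤ 1 + t.length) = true := by simp; omega
          rw [e1, e2]
          cases hall : t.all (fun x => PySem.Chars.isalnum x || PySem.Chars.isIn [x] "-_".toList) <;>
            simp
    · rw [Bool.eq_false_iff.mpr hc]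
      rw [show (if (!false) = true then false
            else (t.all (fun x => PySem.Chars.isalnum x || PySem.Chars.isIn [x] "-_".toList)
                  && decide (1 + t.length ≤ 64) && decide (3 ≤ 1 + t.length))) = false from rfl]
      rw [show (if (!false) = true then false else true) = false from rfl]
      split
      · rfl
      · split
        · rfl
        · rfl
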